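-- pv_equiv track=rewrite | github.com/rolandoquiroz/holbertonschool-machine_learning | supervised_learning/0x10-nlp_metrics/1-ngram_bleu.py | count_ngram
-- ===== SOURCE A (Python) =====
-- def count_ngram(translation_u, ngram=1):
--     """
--     Function that counts n-grams in a sentence
--     """
--     tokens = zip(*[translation_u[i:] for i in range(ngram)])
--     ngrams = [" ".join(token) for token in tokens]
--
--     ngram_counter = {}
--     for n_gram in ngrams:
--         if n_gram not in ngram_counter:
--             ngram_counter[n_gram] = ngrams.count(n_gram)
--
--     return ngram_counter
-- ===== SOURCE B (Python) =====
-- def count_ngram(translation_u, ngram=1):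
--     """Counts n-grams in a sentence with a single-pass sliding-window counter."""
--     ngram_counter = {}
--     if ngram >= 1:
--         for i in range(len(translation_u) - ngram + 1):
--             key = " ".join(translation_u[i:i + ngram])
--             ngram_counter[key] = ngram_counter.get(key, 0) + 1
--     return ngram_counter
-- ===== Notes on version B (the rewrite author's own statement) =====
-- stated objective: faster
-- what changed: Replaces A's zip-of-shifted-slices plus a full ngrams.count scan per distinct key by one sliding-window pass that increments a dict counter, so the quadratic inner scan disappears.
import Mathlib
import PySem

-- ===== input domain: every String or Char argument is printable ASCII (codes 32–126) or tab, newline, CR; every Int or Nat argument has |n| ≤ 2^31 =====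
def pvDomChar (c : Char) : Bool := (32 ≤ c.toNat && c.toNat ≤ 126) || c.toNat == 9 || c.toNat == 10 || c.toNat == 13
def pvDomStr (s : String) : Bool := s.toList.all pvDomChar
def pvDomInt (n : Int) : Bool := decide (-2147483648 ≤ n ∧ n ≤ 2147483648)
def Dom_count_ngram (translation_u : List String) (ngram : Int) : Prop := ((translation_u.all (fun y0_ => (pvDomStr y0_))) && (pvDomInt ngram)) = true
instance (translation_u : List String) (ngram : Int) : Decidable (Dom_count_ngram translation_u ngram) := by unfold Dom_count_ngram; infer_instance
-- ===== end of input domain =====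

-- B replaces A's zip-of-shifted-slices + per-key full-list .count scan by a single
-- sliding-window pass incrementing a dict counter (objective: faster).

-- ===== PORT A =====
-- termination helper for zipStar (the hand port of variadic zip(*lists))
lemma pvSum_tail_lt (ls : List (List String)) (h0 : ls ≠ []) (h1 : ∀ l ∈ ls, l ≠ []) :
    ((ls.map List.tail).map List.length).sum < (ls.map List.length).sum := by
  induction ls with
  | nil => exact absurd rfl h0
  | cons a t ih =>
    have ha : a ≠ [] := h1 a (List.mem_cons_self)
    have ha' : 1 ≤ a.length := List.length_pos_iff.mpr ha
    cases t with
    | nil => simp [List.length_tail]; omega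
    | cons b t' =>
      have := ih (by simp) (fun l hl => h1 l (List.mem_cons_of_mem _ hl))
      simp only [List.map_cons, List.sum_cons] at *
      have hta : a.tail.length < a.length := by simp [List.length_tail]; omega
      omega

-- hand port of Python's variadic zip(*lists): take heads while every list is nonempty
def zipStar (ls : List (List String)) : List (List String) :=
  if h : ls.isEmpty || ls.any List.isEmpty then []
  else (ls.map (fun l => l.headD "")) :: zipStar (ls.map List.tail)
  termination_by (ls.map List.length).sum
  decreasing_by
    simp only [Bool.or_eq_true, not_or, List.any_eq_true, not_exists, List.isEmpty_iff] at h
    have main : ((ls.map List.tail).map List.length).sum < (ls.map List.length).sum := by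
      refine pvSum_tail_lt ls h.1 (fun l hl => fun hnil => (h.2 l) ⟨hl, hnil⟩)
    simpa using main

def count_ngram (translation_u : List String) (ngram : Int) : List (String × Int) :=
  -- tokens = zip(*[translation_u[i:] for i in range(ngram)])
  let tokens := zipStar ((PySem.List.pyRange 0 ngram 1).map
    (fun i => PySem.List.slice translation_u (some i) none))
  -- ngrams = [" ".join(token) for token in tokens]
  let ngrams := tokens.map (fun token => PySem.Str.join " " token)
  -- for n_gram in ngrams: if n_gram not in ngram_counter: ngram_counter[n_gram] = ngrams.count(n_gram)
  let ngram_counter := ngrams.foldl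
    (fun d n_gram => if !d.contains n_gram then d.insert n_gram ((ngrams.count n_gram : Int)) else d)
    (PySem.Dict.empty)
  ngram_counter.items

-- ===== PORT B =====
def count_ngram_alt (translation_u : List String) (ngram : Int) : List (String × Int) :=
  let ngram_counter :=
    if 1 ≤ ngram then
      (PySem.List.pyRange 0 ((translation_u.length : Int) - ngram + 1) 1).foldl
        (fun d i =>
          let key := PySem.Str.join " " (PySem.List.slice translation_u (some i) (some (i + ngram)))
          d.insert key (d.getD key 0 + 1))
        PySem.Dict.empty
    else PySem.Dict.empty
  ngram_counter.items

-- ===== PRECONDITION & SPEC =====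
def Spec_count_ngram (translation_u : List String) (ngram : Int) (out : List (String × Int)) : Prop := out = count_ngram_alt translation_u ngram
instance (translation_u : List String) (ngram : Int) (out : List (String × Int)) : Decidable (Spec_count_ngram translation_u ngram out) := by unfold Spec_count_ngram; infer_instance

-- ===== CLAIM (what is proved, stated in full; the proofs are below) =====
def Claim_equal_count_ngram : Prop := ∀ (translation_u : List String) (ngram : Int), Dom_count_ngram translation_u ngram → Spec_count_ngram translation_u ngram (count_ngram translation_u ngram)

-- ===== LEMMAS AND PROOFS =====

-- the list of windows of width k, the common intermediate of both ports
def pvW (xs : List String) (k : Nat) : List (List String) :=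
  (List.range (xs.length + 1 - k)).map (fun j => (xs.drop j).take k)

lemma zipStar_suffixes (k : Nat) (hk : 1 ≤ k) (xs : List String) :
    zipStar ((List.range k).map (fun j => xs.drop j)) = pvW xs k := by
  induction xs with
  | nil =>
    rw [zipStar]
    simp [pvW, Nat.sub_eq_zero_of_le hk]
  | cons x rest ih =>
    rw [zipStar]
    by_cases hlen : (x :: rest).length < k
    · have h1 : ((List.range k).map (fun j => (x :: rest).drop j)).any List.isEmpty = true := by
        simp only [List.any_eq_true, List.mem_map, List.mem_range]
        exact ⟨[], ⟨k - 1, by omega, by rw [List.drop_eq_nil_iff]; simp at hlen ⊢; omega⟩, by simp⟩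
      have h2 : (x :: rest).length + 1 - k = 0 := by omega
      simp only [h1, Bool.or_true, dite_true, pvW, h2, List.range_zero, List.map_nil]
    · rw [Nat.not_lt] at hlen
      have hcond : (((List.range k).map (fun j => (x :: rest).drop j)).isEmpty
          || ((List.range k).map (fun j => (x :: rest).drop j)).any List.isEmpty) = false := by
        simp only [Bool.or_eq_false_iff]
        refine ⟨by simp; omega, ?_⟩
        simp only [List.any_eq_false, List.mem_map, List.mem_range]
        rintro l ⟨j, hj, rfl⟩
        rw [List.isEmpty_iff, List.drop_eq_nil_iff]
        simp only [List.length_cons] at hlen ⊢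
        omega
      have hc2 : ¬ (((List.range k).map (fun j => (x :: rest).drop j)).isEmpty
          || ((List.range k).map (fun j => (x :: rest).drop j)).any List.isEmpty) = true := by
        simp only [hcond]; exact Bool.false_ne_true
      rw [dif_neg hc2]
      have htails : ((List.range k).map (fun j => (x :: rest).drop j)).map List.tail
          = (List.range k).map (fun j => rest.drop j) := by
        rw [List.map_map]
        refine List.map_congr_left (fun j hj => ?_)
        simp [List.tail_drop]
      have hheads : ((List.range k).map (fun j => (x :: rest).drop j)).map (fun l => l.headD "")
          = (x :: rest).take k := by
        apply List.ext_getElem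
        · simp only [List.length_map, List.length_range, List.length_take]
          simp only [List.length_cons] at hlen ⊢
          omega
        · intro j hj hj'
          simp only [List.getElem_map, List.getElem_range, List.getElem_take]
          rw [List.headD_eq_head?_getD, List.head?_drop]
          simp only [List.length_map, List.length_range] at hj
          rw [List.getElem?_eq_getElem (by simp only [List.length_cons] at hlen ⊢; omega)]
          rfl
      rw [htails, hheads, ih]
      have hW : pvW (x :: rest) k = (x :: rest).take k :: pvW rest k := by
        unfold pvW
        have h3 : (x :: rest).length + 1 - k = (rest.length + 1 - k) + 1 := by
          simp only [List.length_cons] at hlen ⊢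
          omega
        rw [h3, List.range_succ_eq_map, List.map_cons, List.map_map]
        simp [Function.comp_def, List.drop_succ_cons]
      rw [hW]

lemma foldA_getD (F : String → Int) (l : List String) (d : PySem.Dict String Int) (x : String) :
    (l.foldl (fun d g => if !d.contains g then d.insert g (F g) else d) d).getD x 0
      = if d.contains x then d.getD x 0 else if x ∈ l then F x else 0 := by
  induction l generalizing d with
  | nil => by_cases hc : d.contains x <;> simp [hc, PySem.Dict.getD_of_not_contains]
  | cons g t ih =>
    simp only [List.foldl_cons]
    by_cases hg : d.contains g
    · simp only [hg, Bool.not_true, Bool.false_eq_true, if_false, ih]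
      by_cases hx : d.contains x
      · simp [hx]
      · have hxg : x ≠ g := fun h => hx (h ▸ hg)
        simp [hx, List.mem_cons, hxg]
    · rw [Bool.not_eq_true] at hg
      simp only [hg, Bool.not_false, if_true, ih]
      by_cases hxg : x = g
      · subst hxg
        simp [PySem.Dict.contains_insert_self, PySem.Dict.getD_insert_self, hg]
      · have hbe : (x == g) = false := by simp [hxg]
        simp [PySem.Dict.getD_insert, PySem.Dict.contains_insert, hbe, hxg, List.mem_cons]
  

lemma foldA_keys (F : String → Int) (l : List String) (d : PySem.Dict String Int) :
    (l.foldl (fun d g => if !d.contains g then d.insert g (F g) else d) d).keys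
      = PySem.Set.update d.keys l := by
  induction l generalizing d with
  | nil => simp [PySem.Set.update]
  | cons g t ih =>
    simp only [List.foldl_cons]
    rw [PySem.Set.update_cons]
    by_cases hg : d.contains g
    · rw [if_neg (by simp [hg]), ih,
        PySem.Set.add_of_mem ((PySem.Dict.contains_iff_mem_keys _ _).mp hg)]
    · rw [if_pos (by simp [hg]), ih]
      congr 1
      rw [PySem.Dict.keys_insert_of_not_contains _ _ (by simpa using hg),
        PySem.Set.add_of_not_mem (fun hm => hg ((PySem.Dict.contains_iff_mem_keys _ _).mpr hm))]

lemma foldA_items (F : String → Int) (l : List String)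
    (hF : ∀ x ∈ l, F x = (l.count x : Int)) :
    (l.foldl (fun d g => if !d.contains g then d.insert g (F g) else d) PySem.Dict.empty).items
      = (PySem.Dict.counter l).items := by
  have hk : (l.foldl (fun d g => if !d.contains g then d.insert g (F g) else d)
      (PySem.Dict.empty : PySem.Dict String Int)).keys = PySem.Set.ofList l := by
    rw [foldA_keys]
    simp [PySem.Dict.keys_empty, PySem.Set.update_nil_left]
  have hnd : (l.foldl (fun d g => if !d.contains g then d.insert g (F g) else d)
      (PySem.Dict.empty : PySem.Dict String Int)).keys.Nodup := by
    rw [hk]; exact PySem.Set.nodup_ofList l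
  rw [PySem.Dict.items_eq_map_keys _ hnd 0, hk, PySem.Dict.items_counter]
  refine List.map_congr_left (fun k hkmem => ?_)
  have hkl : k ∈ l := (PySem.Set.mem_ofList l k).mp hkmem
  rw [foldA_getD]
  simp [PySem.Dict.contains_empty, hkl, hF k hkl]

-- ===== VERDICT (by name: the statement is the Claim_ definition above) =====
theorem count_ngram_spec : Claim_equal_count_ngram := by
  intro xs ngram _
  unfold Spec_count_ngram
  simp only [count_ngram, count_ngram_alt]
  by_cases hng : 1 ≤ ngram
  · have hK1 : 1 ≤ ngram.toNat := by omega
    have hKg : ngram = (ngram.toNat : Int) := by omega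
    have hA1 : (PySem.List.pyRange 0 ngram 1).map (fun i => PySem.List.slice xs (some i) none)
        = (List.range ngram.toNat).map (fun j => xs.drop j) := by
      rw [hKg, PySem.List.pyRange_one, List.map_map]
      have h0 : (((ngram.toNat : Int)) - 0).toNat = ngram.toNat := by omega
      rw [h0]
      refine List.map_congr_left (fun j hj => ?_)
      simp [PySem.List.slice_from_natCast]
    rw [hA1, zipStar_suffixes ngram.toNat hK1 xs, if_pos hng]
    have hB1 : (PySem.List.pyRange 0 ((xs.length : Int) - ngram + 1) 1).map
        (fun i => PySem.Str.join " " (PySem.List.slice xs (some i) (some (i + ngram))))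
        = (pvW xs ngram.toNat).map (fun w => PySem.Str.join " " w) := by
      rw [hKg, PySem.List.pyRange_one]
      unfold pvW
      rw [List.map_map, List.map_map]
      have hlen : ((xs.length : Int) - (ngram.toNat : Int) + 1 - 0).toNat
          = xs.length + 1 - ngram.toNat := by omega
      rw [hlen]
      refine List.map_congr_left (fun j hj => ?_)
      simp only [Function.comp_apply, zero_add]
      rw [PySem.List.slice_natCast_add, Int.toNat_natCast]
    rw [← List.foldl_map (f := fun i => PySem.Str.join " " (PySem.List.slice xs (some i) (some (i + ngram))))
      (g := fun (d : PySem.Dict String Int) g => d.insert g (d.getD g 0 + 1)), hB1,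
      PySem.Dict.foldl_insert_getD_add_one_eq_counter]
    exact foldA_items _ _ (fun x hx => rfl)
  · have hA0 : PySem.List.pyRange 0 ngram 1 = [] :=
      PySem.List.pyRange_one_eq_nil (by omega)
    rw [hA0, if_neg hng]
    simp only [List.map_nil]
    rw [zipStar]
    simp
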